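-- pv_equiv track=rewrite | github.com/DuJiajun1994/ImageCaptionGAN | cider.py | _get_caption
-- ===== SOURCE A (Python) =====
-- def _get_caption(seq):
--     words = []
--     for word in seq:
--         words.append(str(word))
--         if word == 0:
--             break
--     caption = ' '.join(words)
--     return caption
-- ===== SOURCE B (Python) =====
-- def _get_caption(seq):
--     lst = list(seq)
--     try:
--         end = lst.index(0) + 1
--     except ValueError:
--         end = len(lst)
--     return ' '.join(str(w) for w in lst[:end])
-- ===== Notes on version B (the rewrite author's own statement) =====
-- stated objective: idiomatic
-- what changed: Replaced the accumulate-and-break loop with a locate-then-slice decomposition: find the first zero's index (or the length), slice the prefix, and format it in a separate join pass.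
import Mathlib
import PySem

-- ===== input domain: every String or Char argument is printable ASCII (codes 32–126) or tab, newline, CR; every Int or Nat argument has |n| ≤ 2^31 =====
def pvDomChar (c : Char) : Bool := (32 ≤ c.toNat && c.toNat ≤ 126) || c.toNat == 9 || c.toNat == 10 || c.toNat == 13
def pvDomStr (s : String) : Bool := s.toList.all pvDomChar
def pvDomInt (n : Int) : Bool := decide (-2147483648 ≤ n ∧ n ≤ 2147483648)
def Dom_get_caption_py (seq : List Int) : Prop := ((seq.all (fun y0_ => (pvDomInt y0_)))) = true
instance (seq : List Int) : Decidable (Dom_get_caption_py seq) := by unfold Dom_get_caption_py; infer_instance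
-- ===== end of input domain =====

-- B replaces A's accumulate-and-break loop by locate-the-zero, slice, then format; equivalence of the two is proved below.

-- ===== PORT A =====
-- A's for-loop with break, carried as structural recursion over the remaining seq with the words accumulator.
def getCaptionLoop : List Int → List String → List String
  | [], words => words
  | w :: rest, words =>
      let words' := words ++ [PySem.Int.toStr w]
      if w == 0 then words' else getCaptionLoop rest words'

def get_caption_py (seq : List Int) : String :=
  PySem.Str.join " " (getCaptionLoop seq [])

-- ===== PORT B =====
-- lst.index(0) + 1, falling back to len(lst) on ValueError
def getCaptionEnd (lst : List Int) : Nat :=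
  match PySem.List.index? lst 0 with
  | some k => k + 1
  | none => lst.length

def get_caption_py_alt (seq : List Int) : String :=
  let lst := seq
  PySem.Str.join " " ((lst.take (getCaptionEnd lst)).map PySem.Int.toStr)

-- ===== PRECONDITION & SPEC =====
def Spec_get_caption_py (seq : List Int) (out : String) : Prop := out = get_caption_py_alt seq
instance (seq : List Int) (out : String) : Decidable (Spec_get_caption_py seq out) := by unfold Spec_get_caption_py; infer_instance

-- ===== CLAIM (what is proved, stated in full; the proofs are below) =====
def Claim_equal_get_caption_py : Prop := ∀ (seq : List Int), Dom_get_caption_py seq → Spec_get_caption_py seq (get_caption_py seq)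

-- ===== LEMMAS AND PROOFS =====
theorem getCaptionLoop_eq (seq : List Int) : ∀ (words : List String),
    getCaptionLoop seq words = words ++ (seq.take (getCaptionEnd seq)).map PySem.Int.toStr := by
  induction seq with
  | nil => intro words; simp [getCaptionLoop, getCaptionEnd]
  | cons w rest ih =>
      intro words
      by_cases hw : w = 0
      · subst hw
        have hend : getCaptionEnd (0 :: rest) = 1 := by
          unfold getCaptionEnd; rw [PySem.List.index?_cons_self]
        simp [getCaptionLoop, hend]
      · have hidx : PySem.List.index? (w :: rest) 0 = (PySem.List.index? rest 0).map (· + 1) :=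
          PySem.List.index?_cons_of_ne _ hw
        have hend : getCaptionEnd (w :: rest) = getCaptionEnd rest + 1 := by
          unfold getCaptionEnd
          rw [hidx]
          cases PySem.List.index? rest 0 <;> simp
        have hb : (w == 0) = false := by simpa using hw
        simp only [getCaptionLoop, hb, Bool.false_eq_true, if_false]
        rw [ih, hend]
        simp [List.take_succ_cons]

-- ===== VERDICT (by name: the statement is the Claim_ definition above) =====
theorem get_caption_py_spec : Claim_equal_get_caption_py := by
  intro seq _
  unfold Spec_get_caption_py get_caption_py get_caption_py_alt
  rw [getCaptionLoop_eq seq []]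
  simp
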